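-- pv_equiv track=rewrite | github.com/guillp/adventofcode | aoc2022/8.py | find_visibles
-- ===== SOURCE A (Python) =====
-- def find_visibles(row: str):
--     if len(row) == 0:
--         return 1
--     if len(row) == 1:
--         return 1
--     m = max(row)
--     parts = row.split(m)
--     return find_visibles(parts[0]) + find_visibles(parts[-1])
-- ===== SOURCE B (Python) =====
-- def find_visibles(row: str):
--     # Iterative worklist over index ranges of the original string: no substring
--     # allocation, no split; each segment is scanned once for the first and last
--     # position of its maximum.
--     total = 0
--     stack = [(0, len(row))]
--     while stack:
--         l, r = stack.pop()
--         if r - l <= 1: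
--             total += 1
--             continue
--         i = l
--         j = l
--         for k in range(l + 1, r):
--             if row[k] > row[i]:
--                 i = k
--             if row[k] >= row[j]:
--                 j = k
--         stack.append((l, i))
--         stack.append((j + 1, r))
--     return total
-- ===== Notes on version B (the rewrite author's own statement) =====
-- stated objective: alternative
-- what changed: Replaces A's recursion on freshly allocated substrings (max() + str.split() + recursive calls on the outer parts) by an iterative worklist of (l, r) index ranges over the original string, finding the first and last argmax of each range in one scan and pushing the two sub-ranges, with a running total instead of recursion.
import Mathlib
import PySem

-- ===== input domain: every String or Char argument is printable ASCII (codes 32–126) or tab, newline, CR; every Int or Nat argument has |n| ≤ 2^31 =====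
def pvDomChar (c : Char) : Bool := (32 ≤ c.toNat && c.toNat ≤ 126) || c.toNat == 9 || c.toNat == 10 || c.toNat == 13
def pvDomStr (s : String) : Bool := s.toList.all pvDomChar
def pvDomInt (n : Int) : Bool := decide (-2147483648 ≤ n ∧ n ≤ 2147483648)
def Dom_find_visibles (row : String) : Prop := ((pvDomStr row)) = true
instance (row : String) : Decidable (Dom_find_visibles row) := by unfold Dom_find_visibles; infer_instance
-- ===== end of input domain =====

-- B replaces A's substring-splitting recursion by an iterative worklist of index
-- ranges over the original string (alternative decomposition, no speed claim).


-- ===== PORT A =====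
-- Helpers for Python's row.split(m) with a one-char separator (PySem.Chars.splitOn
-- with singleton sep): splitCh is the structural recursion it computes.  These and
-- the part-length bounds stay above the port because findVisA's termination proof
-- cites headPart_lt / lastPart_lt / mem_of_max?_getD by name.
def splitCh (m : Char) : List Char → List (List Char)
  | [] => [[]]
  | c :: t =>
    let ps := splitCh m t
    if c = m then [] :: ps else (c :: ps.headI) :: ps.tail

theorem splitCh_ne_nil (m : Char) (s : List Char) : splitCh m s ≠ [] := by
  cases s with
  | nil => simp [splitCh]
  | cons c t => by_cases h : c = m <;> simp [splitCh, h]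

theorem cons_headI_tail {α : Type} [Inhabited α] (l : List α) (h : l ≠ []) :
    l.headI :: l.tail = l := by
  cases l with
  | nil => exact absurd rfl h
  | cons a t => rfl

theorem takeWhile_append_not {α : Type} (p : α → Bool) (a : α) (ha : ¬ p a = true) :
    ∀ (xs ys : List α), (xs ++ a :: ys).takeWhile p = xs.takeWhile p := by
  intro xs ys
  induction xs with
  | nil => simp [List.takeWhile, ha]
  | cons x xs ih =>
    by_cases hx : p x = true <;> simp [List.takeWhile_cons, hx, ih]

theorem takeWhile_eq_self_of_all {α : Type} (p : α → Bool) (xs : List α)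
    (h : ∀ x ∈ xs, p x = true) : xs.takeWhile p = xs := by
  induction xs with
  | nil => rfl
  | cons x t ih => simp [List.takeWhile_cons, h x (by simp), ih fun y hy => h y (by simp [hy])]

theorem takeWhile_append_of_exists_not {α : Type} (p : α → Bool) (xs ys : List α)
    (hxm : ∃ a ∈ xs, ¬ p a = true) : (xs ++ ys).takeWhile p = xs.takeWhile p := by
  induction xs with
  | nil => simp_all
  | cons x xs ih2 =>
    by_cases hx : p x = true
    · simp only [List.cons_append, List.takeWhile_cons, hx, if_true]
      rw [ih2]
      rcases hxm with ⟨y, hy, hyp⟩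
      rcases List.mem_cons.mp hy with rfl | hy'
      · exact absurd hx hyp
      · exact ⟨y, hy', hyp⟩
    · simp [List.takeWhile_cons, hx]

theorem splitOn_go_single (m : Char) :
    ∀ (l : List Char) (fuel : Nat) (cur : List Char) (acc : List (List Char)),
      l.length ≤ fuel →
      PySem.Chars.splitOn.go [m] fuel l cur acc =
        acc.reverse ++ (cur.reverse ++ (splitCh m l).headI) :: (splitCh m l).tail := by
  intro l
  induction l with
  | nil =>
    intro fuel cur acc _
    cases fuel <;> rw [PySem.Chars.splitOn.go] <;> simp [splitCh]
  | cons c t ih =>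
    intro fuel cur acc hf
    cases fuel with
    | zero => simp at hf
    | succ f =>
      have hf' : t.length ≤ f := by simpa using hf
      rw [PySem.Chars.splitOn.go]
      by_cases hc : m = c
      · subst hc
        simp only [List.isPrefixOf_cons₂, beq_self_eq_true, true_and, List.isPrefixOf_nil_left,
          if_true, List.length_singleton, List.drop_one, List.tail_cons]
        rw [ih f [] (cur.reverse :: acc) hf']
        have hne := splitCh_ne_nil m t
        simp [splitCh, cons_headI_tail _ hne]
      · have hpre : ([m].isPrefixOf (c :: t)) = false := by
          simp [List.isPrefixOf_cons₂]
          intro h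
          exact hc h
        rw [if_neg (by simp [hpre])]
        rw [ih f (c :: cur) acc hf']
        have hne := splitCh_ne_nil m t
        have hcm : ¬ c = m := fun h => hc h.symm
        simp [splitCh, hcm]

theorem splitOn_single (m : Char) (s : List Char) :
    PySem.Chars.splitOn s [m] = splitCh m s := by
  unfold PySem.Chars.splitOn
  rw [splitOn_go_single m s (s.length+1) [] [] (by omega)]
  have hne := splitCh_ne_nil m s
  simpa using cons_headI_tail _ hne

theorem headI_splitCh (m : Char) (s : List Char) :
    (splitCh m s).headI = s.takeWhile (fun c => !(c == m)) := by
  induction s with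
  | nil => rfl
  | cons c t ih =>
    by_cases h : c = m
    · simp [splitCh, h, List.takeWhile_cons]
    · simp [splitCh, h, List.takeWhile_cons, ih]

theorem splitCh_of_not_mem (m : Char) (s : List Char) (h : m ∉ s) : splitCh m s = [s] := by
  induction s with
  | nil => rfl
  | cons c t ih =>
    have hc : ¬ c = m := by rintro rfl; exact h (by simp)
    have ht := ih (fun hm => h (by simp [hm]))
    simp [splitCh, hc, ht]

theorem length_splitCh (m : Char) (s : List Char) :
    (splitCh m s).length = s.count m + 1 := by
  induction s with
  | nil => simp [splitCh]
  | cons c t ih =>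
    have hne := splitCh_ne_nil m t
    by_cases h : c = m
    · simp [splitCh, h, List.count_cons, ih]
    · have h1 : (splitCh m t).length = List.count m t + 1 := ih
      simp [splitCh, h, List.count_cons, List.length_tail]
      omega

theorem getLast?_splitCh (m : Char) (s : List Char) :
    (splitCh m s).getLast? = some ((s.reverse.takeWhile (fun c => !(c == m))).reverse) := by
  induction s with
  | nil => simp [splitCh]
  | cons c t ih =>
    have hne := splitCh_ne_nil m t
    obtain ⟨p, ps', hps⟩ := List.exists_cons_of_ne_nil hne
    by_cases h : c = m
    · subst h
      rw [show splitCh c (c :: t) = [] :: splitCh c t by simp [splitCh]]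
      rw [hps, List.getLast?_cons_cons, ← hps, ih]
      congr 1
      rw [List.reverse_cons, takeWhile_append_not _ c (by simp)]
    · rw [show splitCh m (c :: t) = (c :: (splitCh m t).headI) :: (splitCh m t).tail by simp [splitCh, h]]
      rcases Decidable.em (ps' = []) with h1 | h1
      · -- splitCh m t = [p], so m ∉ t and p = t
        have hlen : (splitCh m t).length = 1 := by rw [hps, h1]; rfl
        have hcount : t.count m = 0 := by have := length_splitCh m t; omega
        have hnm : m ∉ t := by simpa using List.count_eq_zero.mp hcount
        have hpt : splitCh m t = [t] := splitCh_of_not_mem m t hnm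
        rw [hpt]
        simp only [List.headI, List.tail, List.getLast?_singleton]
        have hall : ∀ x ∈ (c :: t).reverse, (!(x == m)) = true := by
          intro x hx
          simp at hx ⊢
          rcases hx with hx | hx
          · exact fun he => hnm (he ▸ hx)
          · exact fun he => h (by rw [← hx]; exact he)
        rw [takeWhile_eq_self_of_all _ _ hall]
        simp
      · have hmt : m ∈ t := by
          by_contra hnm
          rw [splitCh_of_not_mem m t hnm] at hps
          cases hps; simp_all
        obtain ⟨q, ps'', hq⟩ := List.exists_cons_of_ne_nil h1
        rw [hps, hq]
        simp only [List.headI, List.tail]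
        rw [List.getLast?_cons_cons, ← List.getLast?_cons_cons (a := p), ← hq, ← hps, ih]
        congr 2
        rw [List.reverse_cons]
        exact (takeWhile_append_of_exists_not (fun c => !(c == m)) t.reverse [c]
          ⟨m, by simpa using hmt, by simp⟩).symm

theorem length_takeWhile_lt_of_mem {α : Type} [DecidableEq α] (m : α) (s : List α)
    (h : m ∈ s) : (s.takeWhile (fun c => !(c == m))).length < s.length := by
  induction s with
  | nil => cases h
  | cons c t ih =>
    by_cases hc : c = m
    · simp [List.takeWhile_cons, hc]
    · have hm : m ∈ t := by
        cases h with
        | head => exact absurd rfl hc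
        | tail _ h => exact h
      simp [List.takeWhile_cons, hc]
      exact ih hm

theorem headPart_lt (m : Char) (s : List Char) (h : m ∈ s) :
    (PySem.List.pyGetD (PySem.Chars.splitOn s [m]) 0 []).length < s.length := by
  rw [splitOn_single]
  rw [PySem.List.pyGetD_zero]
  have hne := splitCh_ne_nil m s
  obtain ⟨p, ps', hps⟩ := List.exists_cons_of_ne_nil hne
  have : (splitCh m s).getD 0 [] = (splitCh m s).headI := by rw [hps]; rfl
  rw [this, headI_splitCh]
  exact length_takeWhile_lt_of_mem m s h

theorem lastPart_lt (m : Char) (s : List Char) (h : m ∈ s) :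
    (PySem.List.pyGetD (PySem.Chars.splitOn s [m]) (-1) []).length < s.length := by
  rw [splitOn_single]
  have hne := splitCh_ne_nil m s
  rw [PySem.List.pyGetD_neg_one _ _ hne]
  have hl := getLast?_splitCh m s
  rw [List.getLast?_eq_getLast hne] at hl
  rw [Option.some_inj.mp hl]
  have := length_takeWhile_lt_of_mem m s.reverse (by simpa using h)
  simpa using this

theorem mem_of_max?_getD (s : List Char) (h : s ≠ []) :
    (PySem.List.max? s (fun y => y)).getD ' ' ∈ s := by
  rcases hm : PySem.List.max? s (fun y => y) with _ | m
  · exact absurd ((PySem.List.max?_eq_none_iff s (fun y => y)).mp hm) h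
  · simpa using PySem.List.max?_mem hm

-- A, transliterated on the code-point list: len guards, m = max(row),
-- parts = row.split(m), recurse on parts[0] and parts[-1]
def findVisA (s : List Char) : Int :=
  if s.length == 0 then 1
  else if s.length == 1 then 1
  else
    let m := (PySem.List.max? s (fun y => y)).getD ' '
    let parts := PySem.Chars.splitOn s [m]
    findVisA (PySem.List.pyGetD parts 0 []) + findVisA (PySem.List.pyGetD parts (-1) [])
termination_by s.length
decreasing_by
  · exact headPart_lt _ _ (mem_of_max?_getD s (by simpa using ‹¬ (s.length == 0) = true›))
  · exact lastPart_lt _ _ (mem_of_max?_getD s (by simpa using ‹¬ (s.length == 0) = true›))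

def find_visibles (row : String) : Int := findVisA row.toList

-- ===== PORT B =====
-- one scan of row[l+1:r]: first argmax in .1 (strict >), last argmax in .2 (>=)
def bScan (cs : List Char) (l r : Int) : Int × Int :=
  (PySem.List.pyRange (l + 1) r 1).foldl
    (fun ij k =>
      (if PySem.List.pyGetD cs ij.1 ' ' < PySem.List.pyGetD cs k ' ' then k else ij.1,
       if PySem.List.pyGetD cs ij.2 ' ' ≤ PySem.List.pyGetD cs k ' ' then k else ij.2))
    (l, l)

theorem pyRange_one_self (a : Int) : PySem.List.pyRange a a 1 = [] := by
  simp [PySem.List.pyRange]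

-- scan invariant (bounds + maximality); bScan_bounds is cited by bLoop's termination proof
theorem bScan_spec (cs : List Char) (l r : Int) (h : l < r) :
    l ≤ (bScan cs l r).1 ∧ (bScan cs l r).1 ≤ (bScan cs l r).2 ∧ (bScan cs l r).2 < r ∧
    PySem.List.pyGetD cs (bScan cs l r).1 ' ' = PySem.List.pyGetD cs (bScan cs l r).2 ' ' ∧
    (∀ k, l ≤ k → k < r → PySem.List.pyGetD cs k ' ' ≤ PySem.List.pyGetD cs (bScan cs l r).1 ' ') ∧
    (∀ k, l ≤ k → k < (bScan cs l r).1 → PySem.List.pyGetD cs k ' ' < PySem.List.pyGetD cs (bScan cs l r).1 ' ') ∧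
    (∀ k, (bScan cs l r).2 < k → k < r → PySem.List.pyGetD cs k ' ' < PySem.List.pyGetD cs (bScan cs l r).2 ' ') := by
  have hn : r = l + 1 + ((r - l - 1).toNat : Int) := by omega
  rw [hn] at *
  generalize (r - l - 1).toNat = n at *
  clear hn h
  induction n with
  | zero =>
    have hb : bScan cs l (l + 1 + ((0 : Nat) : Int)) = (l, l) := by
      unfold bScan
      rw [show l + 1 + ((0 : Nat) : Int) = l + 1 by push_cast; ring, pyRange_one_self]
      rfl
    rw [hb]
    refine ⟨le_refl l, le_refl l, by push_cast; omega, rfl, ?_, ?_, ?_⟩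
    · intro k hk1 hk2
      have hkl : k = l := by push_cast at hk2; omega
      subst hkl
      exact le_refl _
    · intro k hk1 hk2
      simp only [] at hk2
      omega
    · intro k hk1 hk2
      push_cast at hk2
      omega
  | succ n ih =>
    rw [show ((n + 1 : Nat) : Int) = (n : Int) + 1 from by push_cast; ring]
    have hstep : PySem.List.pyRange (l + 1) (l + 1 + ((n : Int) + 1)) 1
        = PySem.List.pyRange (l + 1) (l + 1 + (n : Int)) 1 ++ [l + 1 + (n : Int)] := by
      have := PySem.List.pyRange_one_succ_right (a := l + 1) (b := l + 1 + (n : Int)) (by omega)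
      rw [show l + 1 + ((n : Int) + 1) = l + 1 + (n : Int) + 1 by ring, this]
    have hbs : bScan cs l (l + 1 + ((n : Int) + 1))
        = (fun ij k =>
            ((if PySem.List.pyGetD cs ij.1 ' ' < PySem.List.pyGetD cs k ' ' then k else ij.1),
             (if PySem.List.pyGetD cs ij.2 ' ' ≤ PySem.List.pyGetD cs k ' ' then k else ij.2)))
            (bScan cs l (l + 1 + (n : Int))) (l + 1 + (n : Int)) := by
      unfold bScan
      rw [show (l + 1 + ((n : Int) + 1)) = (l + 1 + (n : Int)) + 1 by ring] at *
      rw [PySem.List.pyRange_one_succ_right (by omega), List.foldl_append, List.foldl_cons, List.foldl_nil]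
    obtain ⟨h1, h2, h3, h4, h5, h6, h7⟩ := ih
    set ij := bScan cs l (l + 1 + (n : Int)) with hij
    set b := l + 1 + (n : Int) with hb
    set g : Int → Char := fun k => PySem.List.pyGetD cs k ' ' with hg
    rw [hbs]
    simp only []
    by_cases hlt : g ij.1 < g b
    · -- new max strictly: i' = j' = b
      have hje : g ij.2 ≤ g b := le_of_lt (h4.symm.trans_lt hlt)
      rw [if_pos hlt, if_pos hje]
      refine ⟨by omega, le_refl _, by omega, rfl, ?_, ?_, ?_⟩
      · intro k hk1 hk2
        rcases lt_or_ge k b with hkb | hkb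
        · exact le_of_lt (lt_of_le_of_lt (h5 k hk1 hkb) hlt)
        · have : k = b := by omega
          subst this; exact le_refl _
      · intro k hk1 hk2
        rcases lt_or_ge k ij.1 with hki | hki
        · exact lt_trans (h6 k hk1 hki) hlt
        · exact lt_of_le_of_lt (h5 k hk1 (by omega)) hlt
      · intro k hk1 hk2; omega
    · have hge : g b ≤ g ij.1 := le_of_not_gt hlt
      rw [if_neg hlt]
      by_cases hje : g ij.2 ≤ g b
      · -- equal to max (since g ij.2 = g ij.1 ≥ g b): j' = b
        have hbeq : g b = g ij.1 := le_antisymm hge (h4.trans_le hje)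
        rw [if_pos hje]
        refine ⟨h1, by omega, by omega, hbeq.symm, ?_, ?_, ?_⟩
        · intro k hk1 hk2
          rcases lt_or_ge k b with hkb | hkb
          · exact h5 k hk1 hkb
          · have : k = b := by omega
            subst this; exact hge
        · exact h6
        · intro k hk1 hk2; omega
      · -- smaller: unchanged
        have hlt2 : g b < g ij.2 := lt_of_not_ge hje
        rw [if_neg hje]
        refine ⟨h1, h2, by omega, h4, ?_, h6, ?_⟩
        · intro k hk1 hk2
          rcases lt_or_ge k b with hkb | hkb
          · exact h5 k hk1 hkb
          · have : k = b := by omega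
            subst this; exact le_of_lt (lt_of_lt_of_le hlt2 h4.symm.le)
        · intro k hk1 hk2
          rcases lt_or_ge k b with hkb | hkb
          · exact h7 k hk1 hkb
          · have : k = b := by omega
            subst this; exact hlt2

theorem bScan_bounds (cs : List Char) (l r : Int) (h : ¬ r - l ≤ 1) :
    l ≤ (bScan cs l r).1 ∧ (bScan cs l r).1 ≤ (bScan cs l r).2 ∧ (bScan cs l r).2 < r := by
  obtain ⟨h1, h2, h3, _⟩ := bScan_spec cs l r (by omega)
  exact ⟨h1, h2, h3⟩

-- the while-loop over the explicit stack of (l, r) ranges, with running total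
def bLoop (cs : List Char) : List (Int × Int) → Int → Int
  | [], total => total
  | (l, r) :: st, total =>
    if r - l ≤ 1 then bLoop cs st (total + 1)
    else
      bLoop cs (((bScan cs l r).2 + 1, r) :: (l, (bScan cs l r).1) :: st) total
termination_by st _ => (st.map (fun p => 2 * (p.2 - p.1).toNat + 1)).sum
decreasing_by
  · simp
  · have hb := bScan_bounds cs l r (by assumption)
    simp
    omega

def find_visibles_alt (row : String) : Int :=
  bLoop row.toList [(0, PySem.Str.len row)] 0

-- ===== PRECONDITION & SPEC =====
def Spec_find_visibles (row : String) (out : Int) : Prop := out = find_visibles_alt row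
instance (row : String) (out : Int) : Decidable (Spec_find_visibles row out) := by unfold Spec_find_visibles; infer_instance

-- ===== CLAIM (what is proved, stated in full; the proofs are below) =====
def Claim_equal_find_visibles : Prop := ∀ (row : String), Dom_find_visibles row → Spec_find_visibles row (find_visibles row)

-- ===== LEMMAS AND PROOFS =====

def seg (cs : List Char) (l r : Nat) : List Char := (cs.drop l).take (r - l)

theorem seg_self (cs : List Char) (l : Nat) : seg cs l l = [] := by simp [seg]

theorem seg_len (cs : List Char) (l r : Nat) (hlr : l ≤ r) (hr : r ≤ cs.length) :
    (seg cs l r).length = r - l := by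
  simp [seg]
  omega

theorem seg_append (cs : List Char) (l m r : Nat) (h1 : l ≤ m) (h2 : m ≤ r) :
    seg cs l r = seg cs l m ++ seg cs m r := by
  unfold seg
  rw [show r - l = (m - l) + (r - m) by omega, List.take_add, List.drop_drop]
  rw [show l + (m - l) = m by omega]

theorem seg_cons (cs : List Char) (l r : Nat) (h1 : l < r) (h2 : l < cs.length) :
    seg cs l r = cs.getD l ' ' :: seg cs (l + 1) r := by
  unfold seg
  rw [List.drop_eq_getElem_cons h2]
  rw [show r - l = (r - (l + 1)) + 1 by omega]
  rw [List.take_succ_cons, List.getD_eq_getElem cs ' ' h2]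

theorem seg_getD (cs : List Char) (l r k : Nat) (hk : k < r - l) (hr : r ≤ cs.length) :
    (seg cs l r).getD k ' ' = cs.getD (l + k) ' ' := by
  have hkl : l + k < cs.length := by omega
  have hlen : (seg cs l r).length = r - l := seg_len cs l r (by omega) hr
  rw [List.getD_eq_getElem _ ' ' (by omega), List.getD_eq_getElem _ ' ' hkl]
  simp only [seg, List.getElem_take, List.getElem_drop]

theorem mem_seg (cs : List Char) (l r : Nat) (x : Char) (hr : r ≤ cs.length)
    (hx : x ∈ seg cs l r) : ∃ k, l ≤ k ∧ k < r ∧ x = cs.getD k ' ' := by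
  obtain ⟨k, hk, hget⟩ := List.mem_iff_getElem.mp hx
  have hlr : l ≤ r := by
    by_contra hc
    have h0 : r - l = 0 := by omega
    rw [seg, h0] at hk
    simp at hk
  have hlen : (seg cs l r).length = r - l := seg_len cs l r hlr hr
  refine ⟨l + k, by omega, by omega, ?_⟩
  rw [← seg_getD cs l r k (by omega) hr, List.getD_eq_getElem _ ' ' (by omega), hget]

theorem foldl_max_mem (t : List Char) (c : Char) : t.foldl max c ∈ c :: t := by
  induction t generalizing c with
  | nil => simp
  | cons x xs ih =>
    rw [List.foldl_cons]
    rcases List.mem_cons.mp (ih (max c x)) with h2 | h2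
    · rw [h2]
      rcases max_choice c x with h | h <;> simp [h]
    · simp [h2]

theorem init_le_foldl_max (t : List Char) (c : Char) : c ≤ t.foldl max c := by
  induction t generalizing c with
  | nil => exact le_refl c
  | cons y ys ih => exact le_trans (le_max_left c y) (ih (max c y))

theorem le_foldl_max' (t : List Char) (c : Char) (x : Char) (hx : x ∈ c :: t) :
    x ≤ t.foldl max c := by
  induction t generalizing c with
  | nil => simp at hx; simp [hx]
  | cons y ys ih =>
    rw [List.foldl_cons]
    rcases List.mem_cons.mp hx with rfl | h2
    · exact le_trans (le_max_left x y) (init_le_foldl_max ys (max x y))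
    · rcases List.mem_cons.mp h2 with rfl | h3
      · exact le_trans (le_max_right c x) (init_le_foldl_max ys (max c x))
      · exact ih (max c y) (by simp [h3])

theorem findVisA_short (s : List Char) (h : s.length ≤ 1) : findVisA s = 1 := by
  rw [findVisA]
  rcases Nat.le_one_iff_eq_zero_or_eq_one.mp h with h0 | h1
  · simp [h0]
  · simp [h1]

theorem main_step (cs : List Char) (l r i j : Nat) (hr : r ≤ cs.length) (h2 : 2 ≤ r - l)
    (hbs : bScan cs (l : Int) (r : Int) = ((i : Int), (j : Int))) :
    findVisA (seg cs l r) = findVisA (seg cs l i) + findVisA (seg cs (j + 1) r) := by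
  obtain ⟨h1', h2', h3', h4', h5', h6', h7'⟩ := bScan_spec cs (l : Int) (r : Int) (by omega)
  rw [hbs] at h1' h2' h3' h4' h5' h6' h7'
  simp only [PySem.List.pyGetD_natCast, Prod.fst, Prod.snd] at h1' h2' h3' h4' h5' h6' h7'
  have f1 : l ≤ i := by exact_mod_cast h1'
  have f2 : i ≤ j := by exact_mod_cast h2'
  have f3 : j < r := by exact_mod_cast h3'
  have f4 : cs.getD i ' ' = cs.getD j ' ' := h4'
  have f5 : ∀ k : Nat, l ≤ k → k < r → cs.getD k ' ' ≤ cs.getD i ' ' := by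
    intro k hk1 hk2
    have := h5' (k : Int) (by exact_mod_cast hk1) (by exact_mod_cast hk2)
    simpa using this
  have f6 : ∀ k : Nat, l ≤ k → k < i → cs.getD k ' ' < cs.getD i ' ' := by
    intro k hk1 hk2
    have := h6' (k : Int) (by exact_mod_cast hk1) (by exact_mod_cast hk2)
    simpa using this
  have f7 : ∀ k : Nat, j < k → k < r → cs.getD k ' ' < cs.getD j ' ' := by
    intro k hk1 hk2
    have := h7' (k : Int) (by exact_mod_cast hk1) (by exact_mod_cast hk2)
    simpa using this
  set M := cs.getD i ' ' with hM
  set s := seg cs l r with hsdef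
  have hlen : s.length = r - l := seg_len cs l r (by omega) hr
  have hne : s ≠ [] := by
    intro h0
    rw [h0] at hlen
    simp at hlen
    omega
  obtain ⟨c, t, hs⟩ := List.exists_cons_of_ne_nil hne
  -- the Python max over the segment equals cs[i]
  have hm : (PySem.List.max? s (fun y => y)).getD ' ' = M := by
    rw [hs, PySem.List.max?_id_cons]
    simp only [Option.getD_some]
    apply le_antisymm
    · have hmem : t.foldl max c ∈ c :: t := foldl_max_mem t c
      rw [← hs] at hmem
      obtain ⟨k, hk1, hk2, hkx⟩ := mem_seg cs l r _ hr hmem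
      rw [hkx]
      exact f5 k hk1 hk2
    · have hMmem : M ∈ s := by
        have hilt : i - l < r - l := by omega
        have : s.getD (i - l) ' ' = M := by
          rw [hsdef, seg_getD cs l r (i - l) hilt hr, show l + (i - l) = i by omega]
        rw [← this]
        rw [List.getD_eq_getElem _ ' ' (by omega)]
        exact List.getElem_mem _
      rw [hs] at hMmem
      exact le_foldl_max' t c M hMmem
  have hir : i < cs.length := by omega
  have hjr : j < cs.length := by omega
  -- first part of the split is the segment left of i
  have hhead : PySem.List.pyGetD (PySem.Chars.splitOn s [M]) 0 [] = seg cs l i := by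
    rw [splitOn_single, PySem.List.pyGetD_zero]
    have hpne := splitCh_ne_nil M s
    obtain ⟨p, ps', hps⟩ := List.exists_cons_of_ne_nil hpne
    have hgd : (splitCh M s).getD 0 [] = (splitCh M s).headI := by rw [hps]; rfl
    rw [hgd, headI_splitCh]
    have hsplit : s = seg cs l i ++ (M :: seg cs (i + 1) r) := by
      rw [hsdef, seg_append cs l i r f1 (by omega)]
      congr 1
      exact seg_cons cs i r (by omega) hir
    rw [hsplit, takeWhile_append_not _ M (by simp)]
    apply takeWhile_eq_self_of_all
    intro x hx
    obtain ⟨k, hk1, hk2, rfl⟩ := mem_seg cs l i x (by omega) hx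
    simp only [Bool.not_eq_eq_eq_not, Bool.not_true, beq_eq_false_iff_ne, ne_eq]
    exact ne_of_lt (f6 k hk1 hk2)
  -- last part of the split is the segment right of j
  have hlast : PySem.List.pyGetD (PySem.Chars.splitOn s [M]) (-1) [] = seg cs (j + 1) r := by
    rw [splitOn_single]
    have hpne := splitCh_ne_nil M s
    rw [PySem.List.pyGetD_neg_one _ _ hpne]
    have hgl := getLast?_splitCh M s
    rw [List.getLast?_eq_getLast hpne] at hgl
    rw [Option.some_inj.mp hgl]
    have hsegj : seg cs j (j + 1) = [cs.getD j ' '] := by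
      rw [seg_cons cs j (j + 1) (by omega) hjr, seg_self]
    have hsplit2 : s.reverse = (seg cs (j + 1) r).reverse ++ (M :: (seg cs l j).reverse) := by
      rw [hsdef, seg_append cs l (j + 1) r (by omega) (by omega), List.reverse_append]
      congr 1
      rw [seg_append cs l j (j + 1) (by omega) (by omega), List.reverse_append, hsegj]
      rw [← f4]
      simp
    rw [hsplit2, takeWhile_append_not _ M (by simp)]
    rw [takeWhile_eq_self_of_all, List.reverse_reverse]
    intro x hx
    rw [List.mem_reverse] at hx
    obtain ⟨k, hk1, hk2, rfl⟩ := mem_seg cs (j + 1) r x hr hx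
    simp only [Bool.not_eq_eq_eq_not, Bool.not_true, beq_eq_false_iff_ne, ne_eq]
    have := f7 k (by omega) hk2
    rw [← f4] at this
    exact ne_of_lt this
  rw [findVisA]
  rw [if_neg (by simp [hlen]; omega), if_neg (by simp [hlen]; omega)]
  simp only [hm, hhead, hlast]

theorem bLoop_seg (cs : List Char) :
    ∀ (n l r : Nat) (st : List (Int × Int)) (total : Int), r - l ≤ n → l ≤ r → r ≤ cs.length →
      bLoop cs (((l : Int), (r : Int)) :: st) total = bLoop cs st (total + findVisA (seg cs l r)) := by
  intro n
  induction n with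
  | zero =>
    intro l r st total h hlr hrle
    have hrl : r = l := by omega
    subst hrl
    rw [bLoop, if_pos (by omega)]
    rw [seg_self, findVisA_short [] (by simp)]
  | succ n ih =>
    intro l r st total h hlr hrle
    by_cases hsmall : r - l ≤ 1
    · rw [bLoop, if_pos (by push_cast; omega)]
      rw [findVisA_short (seg cs l r) (by rw [seg_len cs l r hlr hrle]; omega)]
    · rw [bLoop, if_neg (by push_cast; omega)]
      obtain ⟨hb1, hb2, hb3⟩ := bScan_bounds cs (l : Int) (r : Int) (by push_cast; omega)
      have hi0 : (0 : Int) ≤ (bScan cs (l : Int) (r : Int)).1 :=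
        le_trans (by positivity) hb1
      have hj0 : (0 : Int) ≤ (bScan cs (l : Int) (r : Int)).2 := le_trans hi0 hb2
      set i := (bScan cs (l : Int) (r : Int)).1.toNat with hidef
      set j := (bScan cs (l : Int) (r : Int)).2.toNat with hjdef
      have hieq : (bScan cs (l : Int) (r : Int)).1 = (i : Int) := (Int.toNat_of_nonneg hi0).symm
      have hjeq : (bScan cs (l : Int) (r : Int)).2 = (j : Int) := (Int.toNat_of_nonneg hj0).symm
      have hbs : bScan cs (l : Int) (r : Int) = ((i : Int), (j : Int)) := by
        rw [← hieq, ← hjeq]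
      have fli : l ≤ i := by omega
      have fij : i ≤ j := by rw [hieq, hjeq] at hb2; exact_mod_cast hb2
      have fjr : j < r := by rw [hjeq] at hb3; exact_mod_cast hb3
      rw [hieq, hjeq]
      rw [show ((j : Int) + 1) = ((j + 1 : Nat) : Int) by push_cast; ring]
      rw [ih (j + 1) r _ total (by omega) (by omega) hrle]
      rw [ih l i _ _ (by omega) fli (by omega)]
      rw [main_step cs l r i j hrle (by omega) hbs]
      ring_nf

theorem find_visibles_equal (row : String) : find_visibles row = find_visibles_alt row := by
  unfold find_visibles find_visibles_alt
  have hlen : PySem.Str.len row = ((row.toList.length : Nat) : Int) := by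
    simp [PySem.Str.len_eq]
  rw [hlen]
  have hb := bLoop_seg row.toList row.toList.length 0 row.toList.length [] 0 (by omega) (by omega) (by omega)
  rw [show ((0 : Nat) : Int) = (0 : Int) from rfl] at hb
  rw [hb, bLoop]
  have : seg row.toList 0 row.toList.length = row.toList := by
    simp [seg]
  rw [this]
  ring

-- ===== VERDICT (by name: the statement is the Claim_ definition above) =====
theorem find_visibles_spec : Claim_equal_find_visibles := by
  intro row _
  unfold Spec_find_visibles
  exact find_visibles_equal row
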